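-- pv_equiv track=rewrite | github.com/bristot/rtsl | src/python/rt_sched_latency.py | __max_exec_in_a_windown
-- ===== SOURCE A (Python) =====
-- def __max_exec_in_a_windown(vector, window):
--     """
--     Maximum interference an interrupt can add to a given window.
--     """
--     max_exec=0
--     stack={}
--     last_arrival=0
--     for entry in vector:
--         # add the new entry in the stack
--         arrival = entry[0]
--         exec_time = entry[1]
--         stack[arrival]=exec_time
--
--         # for each occurence in the stack, remove thoses that
--         # arrived before window units of time ago.
--         for item in sorted(stack.keys()):
--             delta = arrival - item
--             if delta > window:
--                 stack.pop(item)
--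
--         curr_exec = 0
--         for item in stack.keys():
--             curr_exec += stack[item]
--
--         if curr_exec > max_exec:
--             max_exec = curr_exec
--
--     return max_exec
-- ===== SOURCE B (Python) =====
-- def __max_exec_in_a_windown(vector, window):
--     """
--     Maximum interference an interrupt can add to a given window.
--     Incremental sliding window: keep the live arrivals in a sorted list with a
--     running sum, instead of re-sorting and re-summing the whole dict per entry.
--     """
--     from bisect import insort
--     live = []      # sorted arrival times currently inside the window
--     execs = {}     # arrival -> exec time, for the live arrivals only
--     total = 0      # running sum of the live exec times
--     best = 0
--     for entry in vector:
--         arrival = entry[0]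
--         exec_time = entry[1]
--         if arrival in execs:
--             total += exec_time - execs[arrival]
--             execs[arrival] = exec_time
--         else:
--             insort(live, arrival)
--             execs[arrival] = exec_time
--             total += exec_time
--         while live and live[0] < arrival - window:
--             total -= execs.pop(live.pop(0), 0)
--         if total > best:
--             best = total
--     return best
-- ===== Notes on version B (the rewrite author's own statement) =====
-- stated objective: alternative
-- what changed: A re-sorts the whole dict's keys and re-sums all its values on every entry; B maintains an incremental sliding window (sorted live list kept by insort, membership dict, and a running sum) updated per entry.
import Mathlib
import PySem

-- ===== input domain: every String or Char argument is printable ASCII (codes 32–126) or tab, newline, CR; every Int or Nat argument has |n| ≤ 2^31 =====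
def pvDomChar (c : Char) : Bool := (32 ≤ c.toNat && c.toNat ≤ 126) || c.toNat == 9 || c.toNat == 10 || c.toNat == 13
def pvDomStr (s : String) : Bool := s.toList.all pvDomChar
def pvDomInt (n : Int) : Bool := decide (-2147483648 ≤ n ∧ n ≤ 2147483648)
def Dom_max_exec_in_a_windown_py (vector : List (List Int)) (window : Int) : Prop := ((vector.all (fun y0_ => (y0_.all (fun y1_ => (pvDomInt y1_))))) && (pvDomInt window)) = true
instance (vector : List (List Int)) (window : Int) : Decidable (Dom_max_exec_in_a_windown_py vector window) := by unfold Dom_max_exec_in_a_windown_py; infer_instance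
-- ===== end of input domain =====

-- B replaces A's per-entry full re-sort and re-sum of the dict by an incremental
-- sliding window (sorted live list + running sum); return value only, no mutation.

-- ===== PORT A =====
-- the inner removal loop: for item in sorted(stack.keys()): if arrival - item > window: stack.pop(item)
def pvAErase (window arrival : Int) (d : PySem.Dict Int Int) (L : List Int) : PySem.Dict Int Int :=
  L.foldl (fun d item => if arrival - item > window then d.erase item else d) d

def pvAStep (window : Int) (st : Int × PySem.Dict Int Int) (entry : List Int) : Int × PySem.Dict Int Int :=
  let arrival := (PySem.List.pyGet? entry 0).getD 0    -- entry[0]; Pre_ guarantees the index is in range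
  let exec_time := (PySem.List.pyGet? entry 1).getD 0  -- entry[1]
  let stack := st.2.insert arrival exec_time
  let stack := pvAErase window arrival stack (PySem.List.sorted stack.keys (fun k => k) false)
  let curr := stack.keys.foldl (fun c item => c + stack.getD item 0) 0
  (if curr > st.1 then curr else st.1, stack)

-- A's 'last_arrival' variable is assigned 0 and never read; it is not carried.
def max_exec_in_a_windown_py (vector : List (List Int)) (window : Int) : Int :=
  (vector.foldl (pvAStep window) (0, PySem.Dict.empty)).1

-- ===== PORT B =====
-- bisect.insort on a list of distinct ints (only called when x is not in xs)
def pvInsort (xs : List Int) (x : Int) : List Int :=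
  match xs with
  | [] => [x]
  | y :: t => if x < y then x :: y :: t else y :: pvInsort t x

-- while live and live[0] < arrival - window: total -= execs.pop(live.pop(0), 0)
def pvPrune (bound : Int) : List Int → Int → PySem.Dict Int Int → List Int × Int × PySem.Dict Int Int
  | [], total, execs => ([], total, execs)
  | k :: rest, total, execs =>
      if k < bound then pvPrune bound rest (total - execs.getD k 0) (execs.erase k)
      else (k :: rest, total, execs)

def pvBStep (window : Int) (st : Int × Int × List Int × PySem.Dict Int Int) (entry : List Int) :
    Int × Int × List Int × PySem.Dict Int Int :=
  let arrival := (PySem.List.pyGet? entry 0).getD 0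
  let exec_time := (PySem.List.pyGet? entry 1).getD 0
  let best := st.1
  let total := st.2.1
  let live := st.2.2.1
  let execs := st.2.2.2
  let s1 :=
    match execs.get? arrival with
    | some old => (total + (exec_time - old), live, execs.insert arrival exec_time)
    | none => (total + exec_time, pvInsort live arrival, execs.insert arrival exec_time)
  let pr := pvPrune (arrival - window) s1.2.1 s1.1 s1.2.2
  (if pr.2.1 > best then pr.2.1 else best, pr.2.1, pr.1, pr.2.2)

def max_exec_in_a_windown_py_alt (vector : List (List Int)) (window : Int) : Int :=
  (vector.foldl (pvBStep window) (0, 0, [], PySem.Dict.empty)).1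

-- ===== PRECONDITION & SPEC =====
-- Pre_ excludes exactly the inputs where Python A raises (IndexError on entry[0]/entry[1]).
def Pre_max_exec_in_a_windown_py (vector : List (List Int)) (window : Int) : Prop :=
  ∀ entry ∈ vector, 2 ≤ entry.length
instance (vector : List (List Int)) (window : Int) : Decidable (Pre_max_exec_in_a_windown_py vector window) := by unfold Pre_max_exec_in_a_windown_py; infer_instance
def pvWitness_max_exec_in_a_windown_py : List (List Int) × Int := ([[0, 2], [1, 3], [5, 1]], 2)

def Spec_max_exec_in_a_windown_py (vector : List (List Int)) (window : Int) (out : Int) : Prop := out = max_exec_in_a_windown_py_alt vector window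
instance (vector : List (List Int)) (window : Int) (out : Int) : Decidable (Spec_max_exec_in_a_windown_py vector window out) := by unfold Spec_max_exec_in_a_windown_py; infer_instance

-- ===== CLAIM (what is proved, stated in full; the proofs are below) =====
def Claim_equal_max_exec_in_a_windown_py : Prop := ∀ (vector : List (List Int)) (window : Int), Dom_max_exec_in_a_windown_py vector window → Pre_max_exec_in_a_windown_py vector window → Spec_max_exec_in_a_windown_py vector window (max_exec_in_a_windown_py vector window)

-- ===== LEMMAS AND PROOFS =====

-- The coupling invariant between A's dict and B's (live, execs, total) state.
def pvInv (stack : PySem.Dict Int Int) (live : List Int) (execs : PySem.Dict Int Int) (total : Int) : Prop :=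
  stack.keys.Nodup ∧ live.Perm stack.keys ∧ live.Pairwise (· < ·) ∧
  (∀ k, execs.get? k = stack.get? k) ∧ total = stack.values.sum

lemma pvGet?_erase (d : PySem.Dict Int Int) (k j : Int) :
    (d.erase k).get? j = if j = k then none else d.get? j := by
  obtain ⟨l⟩ := d
  induction l with
  | nil => simp [PySem.Dict.erase, PySem.Dict.get?]
  | cons p t ih =>
    simp only [PySem.Dict.erase, PySem.Dict.get?, List.filter_cons] at *
    by_cases hpk : p.1 = k <;> by_cases hpj : p.1 = j <;>
      simp_all [beq_iff_eq]

lemma pvMap_fst_filter (l : List (Int × Int)) (q : Int → Bool) :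
    (l.filter (fun p => q p.1)).map (·.1) = (l.map (·.1)).filter q := by
  induction l with
  | nil => simp
  | cons p t ih => by_cases h : q p.1 <;> simp [h, ih]

lemma pvKeys_erase (d : PySem.Dict Int Int) (k : Int) :
    (d.erase k).keys = d.keys.filter (fun x => x ≠ k) := by
  obtain ⟨l⟩ := d
  have := pvMap_fst_filter l (fun x => !(x == k))
  simp only [PySem.Dict.erase, PySem.Dict.keys] at *
  convert this using 2
  funext x; simp; rfl

lemma pvSum_insert_none (d : PySem.Dict Int Int) (a e : Int) (h : d.get? a = none) :
    (d.insert a e).values.sum = d.values.sum + e := by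
  have hc : d.contains a = false := by
    rw [PySem.Dict.contains_eq_isSome_get?, h]; rfl
  rw [PySem.Dict.values, PySem.Dict.items_insert_of_not_contains d e hc]
  simp [PySem.Dict.values]

-- sum over the item list with one key's value replaced
lemma pvSum_map_replace (a e old : Int) :
    ∀ (l : List (Int × Int)), (l.map (·.1)).Nodup →
      (Option.map (fun x => x.2) (l.find? (fun p => p.1 == a))) = some old →
      ((l.map (fun p => if (p.1 == a) = true then (a, e) else p)).map (·.2)).sum
        = (l.map (·.2)).sum + (e - old) := by
  intro l
  induction l with
  | nil => simp
  | cons p t ih =>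
    intro hnd h
    simp only [List.map_cons, List.nodup_cons] at hnd
    by_cases hpa : p.1 = a
    · have hmap : t.map (fun p => if (p.1 == a) = true then (a, e) else p) = t := by
        apply List.map_congr_left ?_ |>.trans (List.map_id t)
        intro q hq
        have : q.1 ≠ a := fun hqa => hnd.1 (hpa ▸ hqa ▸ (List.mem_map_of_mem hq))
        simp [this]
      have hold : old = p.2 := by
        simp [hpa] at h; omega
      have hh : (p :: t).map (fun p => if (p.1 == a) = true then (a, e) else p) = (a, e) :: t := by
        rw [List.map_cons, if_pos (by simp [hpa]), hmap]
      rw [hh]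
      simp only [List.map_cons, List.sum_cons, hold]
      ring
    · have h' : (Option.map (fun x => x.2) (t.find? (fun p => p.1 == a))) = some old := by
        simpa [List.find?_cons, hpa] using h
      have hhead : (if (p.1 == a) = true then (a, e) else p) = p := by
        rw [if_neg]; simp [hpa]
      simp only [List.map_cons, hhead, List.sum_cons, ih hnd.2 h']
      ring

lemma pvSum_insert_some (d : PySem.Dict Int Int) (a e old : Int)
    (hnd : d.keys.Nodup) (h : d.get? a = some old) :
    (d.insert a e).values.sum = d.values.sum + (e - old) := by
  have hc : d.contains a = true := by
    rw [PySem.Dict.contains_eq_isSome_get?, h]; rfl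
  rw [PySem.Dict.values, PySem.Dict.items_insert_of_contains d e hc]
  exact pvSum_map_replace a e old d.items hnd h

lemma pvSum_erase (d : PySem.Dict Int Int) (k v : Int)
    (hnd : d.keys.Nodup) (h : d.get? k = some v) :
    (d.erase k).values.sum = d.values.sum - v := by
  obtain ⟨l⟩ := d
  simp only [PySem.Dict.get?, PySem.Dict.keys, PySem.Dict.values, PySem.Dict.erase] at *
  induction l with
  | nil => simp at h
  | cons p t ih =>
    simp only [List.map_cons, List.nodup_cons] at hnd
    by_cases hpk : p.1 = k
    · have hfil : t.filter (fun p => !(p.1 == k)) = t := by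
        apply List.filter_eq_self.mpr
        intro q hq
        have : q.1 ≠ k := fun hqk => hnd.1 (hpk ▸ hqk ▸ (List.mem_map_of_mem hq))
        simp [this]
      have hv : v = p.2 := by simp [hpk] at h; omega
      simp [List.filter_cons, hpk, hfil, hv]
    · have h' : (Option.map (fun x => x.2) (t.find? (fun p => p.1 == k))) = some v := by
        simpa [List.find?_cons, hpk] using h
      simp only [List.filter_cons, if_pos (by simp [hpk] : (!(p.1 == k)) = true)]
      simp only [List.map_cons, List.sum_cons, ih hnd.2 h']
      ring

lemma pvInsort_perm (xs : List Int) (x : Int) : (pvInsort xs x).Perm (x :: xs) := by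
  induction xs with
  | nil => simp [pvInsort]
  | cons y t ih =>
    by_cases h : x < y
    · simp [pvInsort, h]
    · simp only [pvInsort, if_neg h]
      exact (List.Perm.cons y ih).trans (List.Perm.swap x y t)

lemma pvInsort_mem (xs : List Int) (x z : Int) :
    z ∈ pvInsort xs x ↔ z = x ∨ z ∈ xs := by
  have := (pvInsort_perm xs x).mem_iff (a := z)
  simpa using this

lemma pvInsort_pairwise (xs : List Int) (x : Int) (hs : xs.Pairwise (· < ·)) (hx : x ∉ xs) :
    (pvInsort xs x).Pairwise (· < ·) := by
  induction xs with
  | nil => simp [pvInsort]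
  | cons y t ih =>
    rw [List.pairwise_cons] at hs
    by_cases h : x < y
    · simp only [pvInsort, if_pos h, List.pairwise_cons]
      refine ⟨?_, hs⟩
      intro z hz
      rcases List.mem_cons.mp hz with rfl | hz
      · exact h
      · exact h.trans (hs.1 z hz)
    · simp only [pvInsort, if_neg h, List.pairwise_cons]
      have hyx : y < x := by
        rcases lt_or_eq_of_le (not_lt.mp h) with h' | h'
        · exact h'
        · exact absurd h'.symm (fun hh => hx (hh ▸ List.mem_cons_self))
      refine ⟨?_, ih hs.2 (fun hm => hx (List.mem_cons_of_mem y hm))⟩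
      intro z hz
      rcases (pvInsort_mem t x z).mp hz with rfl | hz
      · exact hyx
      · exact hs.1 z hz

lemma pvAErase_items (w a : Int) : ∀ (L : List Int) (d : PySem.Dict Int Int),
    (pvAErase w a d L).items
      = d.items.filter (fun p => !(decide (p.1 ∈ L) && decide (a - p.1 > w))) := by
  intro L
  induction L with
  | nil => intro d; simp [pvAErase]
  | cons x L ih =>
    intro d
    have hstep : pvAErase w a d (x :: L)
        = pvAErase w a (if a - x > w then d.erase x else d) L := by
      simp [pvAErase]
    rw [hstep, ih]
    by_cases hx : a - x > w
    · rw [if_pos hx]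
      show (d.items.filter _).filter _ = _
      rw [List.filter_filter]
      apply List.filter_congr
      intro p _
      by_cases hpx : p.1 = x
      · simp [hpx, hx]
      · simp [hpx, List.mem_cons]
    · rw [if_neg hx]
      apply List.filter_congr
      intro p _
      by_cases hpx : p.1 = x
      · simp [hpx, hx, List.mem_cons]
      · simp [hpx, List.mem_cons]

-- with L = sorted keys, A's removal loop is exactly a filter on the items
lemma pvAErase_sorted_items (w a : Int) (d : PySem.Dict Int Int) :
    (pvAErase w a d (PySem.List.sorted d.keys (fun k => k) false)).items
      = d.items.filter (fun p => !decide (a - p.1 > w)) := by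
  rw [pvAErase_items]
  apply List.filter_congr
  intro p hp
  have : p.1 ∈ PySem.List.sorted d.keys (fun k => k) false := by
    rw [PySem.List.mem_sorted]
    exact PySem.Dict.mem_keys_of_mem_items d hp
  simp [this]

lemma pvCurr_eq (d : PySem.Dict Int Int) (hnd : d.keys.Nodup) :
    d.keys.foldl (fun c item => c + d.getD item 0) 0 = d.values.sum := by
  rw [PySem.List.foldl_add d.keys (fun item => d.getD item 0) 0,
    PySem.Dict.values_eq_map_keys d hnd 0]
  ring

-- the insertion phase preserves the invariant
lemma pvInsert_inv (a e : Int) (stack execs : PySem.Dict Int Int) (live : List Int) (total : Int)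
    (h : pvInv stack live execs total) :
    pvInv (stack.insert a e)
      (match execs.get? a with
       | some _ => live
       | none => pvInsort live a)
      (execs.insert a e)
      (match execs.get? a with
       | some old => total + (e - old)
       | none => total + e) := by
  obtain ⟨h1, h2, h3, h4, h5⟩ := h
  have h4' : ∀ j, (execs.insert a e).get? j = (stack.insert a e).get? j := by
    intro j
    rw [PySem.Dict.get?_insert, PySem.Dict.get?_insert]
    split_ifs
    · rfl
    · exact h4 j
  cases hg : execs.get? a with
  | some old =>
    have hsg : stack.get? a = some old := by rw [← h4 a, hg]
    have hc : stack.contains a = true := by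
      rw [PySem.Dict.contains_eq_isSome_get?, hsg]; rfl
    refine ⟨PySem.Dict.nodup_keys_insert stack a e h1, ?_, h3, h4', ?_⟩
    · rw [PySem.Dict.keys_insert_of_contains stack e hc]; exact h2
    · rw [pvSum_insert_some stack a e old h1 hsg, h5]
  | none =>
    have hsg : stack.get? a = none := by rw [← h4 a, hg]
    have hc : stack.contains a = false := by
      rw [PySem.Dict.contains_eq_isSome_get?, hsg]; rfl
    have hna : a ∉ live := fun hm =>
      ((PySem.Dict.get?_eq_none_iff_not_mem_keys stack a).mp hsg) (h2.mem_iff.mp hm)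
    refine ⟨PySem.Dict.nodup_keys_insert stack a e h1, ?_, pvInsort_pairwise live a h3 hna, h4', ?_⟩
    · rw [PySem.Dict.keys_insert_of_not_contains stack e hc]
      exact (pvInsort_perm live a).trans
        ((h2.cons a).trans (List.perm_append_singleton a stack.keys).symm)
    · rw [pvSum_insert_none stack a e hsg, h5]

lemma pvPrune_inv (a w : Int) :
    ∀ (live : List Int) (stack execs : PySem.Dict Int Int) (total : Int),
      pvInv stack live execs total →
      pvInv (PySem.Dict.mk (stack.items.filter (fun p => !decide (a - p.1 > w))))
        (pvPrune (a - w) live total execs).1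
        (pvPrune (a - w) live total execs).2.2
        (pvPrune (a - w) live total execs).2.1 := by
  intro live
  induction live with
  | nil =>
    intro stack execs total ⟨h1, h2, h3, h4, h5⟩
    have hk : stack.keys = [] := List.Perm.nil_eq h2 |>.symm
    have hi : stack.items = [] := by
      have := hk
      simp only [PySem.Dict.keys, List.map_eq_nil_iff] at this
      exact this
    have hd : PySem.Dict.mk (stack.items.filter (fun p => !decide (a - p.1 > w))) = stack := by
      apply PySem.Dict.ext
      simp [hi]
    rw [hd]
    exact ⟨h1, h2, h3, h4, h5⟩
  | cons k rest ih =>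
    intro stack execs total ⟨h1, h2, h3, h4, h5⟩
    have hpw := List.pairwise_cons.mp h3
    by_cases hk : k < a - w
    · -- k is pruned on both sides
      have hkm : k ∈ stack.keys := h2.mem_iff.mp List.mem_cons_self
      obtain ⟨v, hv⟩ : ∃ v, stack.get? k = some v := by
        cases hgk : stack.get? k with
        | none => exact absurd ((PySem.Dict.get?_eq_none_iff_not_mem_keys stack k).mp hgk) (by simp [hkm])
        | some v => exact ⟨v, rfl⟩
      have hgD : execs.getD k 0 = v := by
        rw [PySem.Dict.getD_eq_get?_getD, h4 k, hv]; rfl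
      have hknr : k ∉ rest := fun hm => lt_irrefl k (hpw.1 k hm)
      have hfc : (k :: rest).filter (fun x => decide (x ≠ k)) = rest := by
        rw [List.filter_cons, if_neg (by simp)]
        exact List.filter_eq_self.mpr (fun z hz => by
          have := hpw.1 z hz
          simp; omega)
      have hInv' : pvInv (stack.erase k) rest (execs.erase k) (total - execs.getD k 0) := by
        refine ⟨?_, ?_, hpw.2, ?_, ?_⟩
        · rw [pvKeys_erase]; exact h1.filter _
        · rw [pvKeys_erase]
          exact hfc ▸ (h2.filter (fun x => decide (x ≠ k)))
        · intro j
          rw [pvGet?_erase, pvGet?_erase]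
          split_ifs
          · rfl
          · exact h4 j
        · rw [hgD, pvSum_erase stack k v h1 hv, h5]
      have hIH := ih (stack.erase k) (execs.erase k) (total - execs.getD k 0) hInv'
      have hdd : PySem.Dict.mk ((stack.erase k).items.filter (fun p => !decide (a - p.1 > w)))
          = PySem.Dict.mk (stack.items.filter (fun p => !decide (a - p.1 > w))) := by
        apply PySem.Dict.ext
        show ((stack.items.filter _).filter _) = _
        rw [List.filter_filter]
        apply List.filter_congr
        intro p _
        by_cases hpk : p.1 = k
        · simp [hpk]; omega
        · simp [hpk]
      rw [hdd] at hIH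
      simpa only [pvPrune, if_pos hk] using hIH
    · -- nothing gets pruned: every remaining key is inside the window
      have hfs : stack.items.filter (fun p => !decide (a - p.1 > w)) = stack.items := by
        apply List.filter_eq_self.mpr
        intro p hp
        have hpm : p.1 ∈ k :: rest := h2.symm.mem_iff.mp (PySem.Dict.mem_keys_of_mem_items stack hp)
        have : ¬(a - p.1 > w) := by
          rcases List.mem_cons.mp hpm with rfl | hm
          · omega
          · have := hpw.1 p.1 hm
            omega
        simpa using this
      have hd : PySem.Dict.mk (stack.items.filter (fun p => !decide (a - p.1 > w))) = stack := by
        apply PySem.Dict.ext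
        simpa using hfs
      rw [hd]
      simpa only [pvPrune, if_neg hk] using ⟨h1, h2, h3, h4, h5⟩

lemma pvStep (w : Int) (entry : List Int) (best total : Int) (live : List Int)
    (stack execs : PySem.Dict Int Int) (h : pvInv stack live execs total) :
    (pvAStep w (best, stack) entry).1 = (pvBStep w (best, total, live, execs) entry).1 ∧
    pvInv (pvAStep w (best, stack) entry).2
      (pvBStep w (best, total, live, execs) entry).2.2.1
      (pvBStep w (best, total, live, execs) entry).2.2.2
      (pvBStep w (best, total, live, execs) entry).2.1 := by
  have hIns := pvInsert_inv ((PySem.List.pyGet? entry 0).getD 0) ((PySem.List.pyGet? entry 1).getD 0)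
    stack execs live total h
  have hPr := pvPrune_inv ((PySem.List.pyGet? entry 0).getD 0) w _ _ _ _ hIns
  have hstack2 : pvAErase w ((PySem.List.pyGet? entry 0).getD 0)
      (stack.insert ((PySem.List.pyGet? entry 0).getD 0) ((PySem.List.pyGet? entry 1).getD 0))
      (PySem.List.sorted (stack.insert ((PySem.List.pyGet? entry 0).getD 0) ((PySem.List.pyGet? entry 1).getD 0)).keys (fun k => k) false)
      = PySem.Dict.mk ((stack.insert ((PySem.List.pyGet? entry 0).getD 0) ((PySem.List.pyGet? entry 1).getD 0)).items.filter
          (fun p => !decide ((PySem.List.pyGet? entry 0).getD 0 - p.1 > w))) := by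
    apply PySem.Dict.ext
    exact pvAErase_sorted_items w _ _
  cases hg : execs.get? ((PySem.List.pyGet? entry 0).getD 0) with
  | some old =>
    simp only [hg] at hPr
    obtain ⟨p1, p2, p3, p4, p5⟩ := hPr
    simp only [pvAStep, pvBStep, hg]
    rw [hstack2, pvCurr_eq _ p1, ← p5]
    exact ⟨rfl, p1, p2, p3, p4, p5⟩
  | none =>
    simp only [hg] at hPr
    obtain ⟨p1, p2, p3, p4, p5⟩ := hPr
    simp only [pvAStep, pvBStep, hg]
    rw [hstack2, pvCurr_eq _ p1, ← p5]
    exact ⟨rfl, p1, p2, p3, p4, p5⟩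

lemma pvLoop (w : Int) :
    ∀ (v : List (List Int)) (best total : Int) (live : List Int)
      (stack execs : PySem.Dict Int Int), pvInv stack live execs total →
      (v.foldl (pvAStep w) (best, stack)).1
        = (v.foldl (pvBStep w) (best, total, live, execs)).1 := by
  intro v
  induction v with
  | nil => intro best total live stack execs _; rfl
  | cons entry t ih =>
    intro best total live stack execs h
    obtain ⟨hb, hinv⟩ := pvStep w entry best total live stack execs h
    simp only [List.foldl_cons]
    have hA : t.foldl (pvAStep w) (pvAStep w (best, stack) entry)
        = t.foldl (pvAStep w) ((pvAStep w (best, stack) entry).1, (pvAStep w (best, stack) entry).2) := by rfl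
    have hB : t.foldl (pvBStep w) (pvBStep w (best, total, live, execs) entry)
        = t.foldl (pvBStep w) ((pvBStep w (best, total, live, execs) entry).1,
            (pvBStep w (best, total, live, execs) entry).2.1,
            (pvBStep w (best, total, live, execs) entry).2.2.1,
            (pvBStep w (best, total, live, execs) entry).2.2.2) := by rfl
    rw [hA, hB, hb]
    exact ih _ _ _ _ _ hinv

-- ===== VERDICT (by name: the statement is the Claim_ definition above) =====
theorem max_exec_in_a_windown_py_spec : Claim_equal_max_exec_in_a_windown_py := by
  intro vector window _ _
  unfold Spec_max_exec_in_a_windown_py max_exec_in_a_windown_py max_exec_in_a_windown_py_alt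
  exact pvLoop window vector 0 0 [] PySem.Dict.empty PySem.Dict.empty
    ⟨by simp [PySem.Dict.keys, PySem.Dict.empty], by simp [PySem.Dict.keys, PySem.Dict.empty],
     by simp, fun k => rfl, rfl⟩
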